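-- pv_equiv track=rewrite | github.com/mdmoeller/uroborus | ex/mutator/mutator.py | mutateArith
-- ===== SOURCE A (Python) =====
-- arithChars = ['+', '-', '*', '/', '%']
--
-- def mutateArith(line,op):
--
--     # splits the line into pieces that flank the operator
--     splits = line.split(" " + op + " ")
--
--     # the number of times the operator appears
--     instances = len(splits) - 1
--
--     # stores the mutated lines
--     out = []
--
--     # go over each split and change the one operator, creating 4
--     # new lines per occurance of the targetted operator
--     for x in range (0, len(arithChars)):
--         if(arithChars[x] != op):
--
--             # generates a mutation for each instance of the operator
--             # in the line
--             for y in range (1, instances + 1):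
--                 out.append(mutateLineAt(splits, y, op,  arithChars[x]))
--
--     return out
--
-- def mutateLineAt(splits, instanceNum, targetOp, replaceOp):
--
--     # No splits, just the rest of the line
--     if(len(splits) == 1):
--         return splits[0]
--
--     # Replacement has occurred, returning the rest of the line as is
--     if(instanceNum == 0):
--         return splits[0] + " " + targetOp + " " +  mutateLineAt(splits[1:], 0, \
--                                                                     targetOp, \
--                                                                     replaceOp)
--
--     # At the replacement instance, replace target operator with new operator.
--     if(instanceNum == 1):
--         return splits[0] + " " + replaceOp + " " +  mutateLineAt(splits[1:], 0, \
--                                                                     targetOp, \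
--                                                                     replaceOp)
--
--     # Count down until the operator we wish to replace is reached
--     return splits[0] + " " + targetOp + " " +  mutateLineAt(splits[1:], instanceNum-1,\
--                                                                 targetOp, replaceOp)
-- ===== SOURCE B (Python) =====
-- arithChars = ['+', '-', '*', '/', '%']
--
-- def mutateArith(line, op):
--     # Build each mutated line directly: pieces from the split, joined by the
--     # original separator except at position y-1 where the replacement goes.
--     sep = " " + op + " "
--     splits = line.split(sep)
--     n = len(splits) - 1
--     out = []
--     for c in arithChars:
--         if c != op:
--             for y in range(1, n + 1):
--                 seps = [sep] * n
--                 seps[y - 1] = " " + c + " "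
--                 res = splits[0]
--                 for s, p in zip(seps, splits[1:]):
--                     res = res + s + p
--                 out.append(res)
--     return out
-- ===== Notes on version B (the rewrite author's own statement) =====
-- stated objective: simpler
-- what changed: B replaces A's recursive count-down rebuild (mutateLineAt, one recursion per piece per output line) by a direct construction: make the list of n separators, overwrite the (y-1)-th with the replacement operator, and fold the pieces and separators together.
import Mathlib
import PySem

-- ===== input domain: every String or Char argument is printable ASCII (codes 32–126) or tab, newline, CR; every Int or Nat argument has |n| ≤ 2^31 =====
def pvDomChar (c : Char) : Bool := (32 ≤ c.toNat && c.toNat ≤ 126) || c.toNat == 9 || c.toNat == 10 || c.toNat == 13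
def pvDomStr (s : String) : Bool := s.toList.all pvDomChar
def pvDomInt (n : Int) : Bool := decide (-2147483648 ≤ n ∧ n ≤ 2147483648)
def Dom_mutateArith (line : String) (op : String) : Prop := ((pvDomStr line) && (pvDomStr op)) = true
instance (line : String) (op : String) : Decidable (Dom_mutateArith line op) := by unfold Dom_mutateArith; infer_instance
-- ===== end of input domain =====

-- B builds each mutated line directly from the split pieces and an explicit separator
-- list instead of A's recursive count-down rebuild; objective: simpler.

-- ===== PORT A =====
def arithCharsA : List String := ["+", "-", "*", "/", "%"]

def mutateLineAt (splits : List String) (instanceNum : Int) (targetOp replaceOp : String) : String :=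
  match splits with
  | [] => ""   -- unreachable from mutateArith (Python would raise IndexError on [])
  | [s] => s
  | s :: rest =>
      if instanceNum = 0 then
        s ++ " " ++ targetOp ++ " " ++ mutateLineAt rest 0 targetOp replaceOp
      else if instanceNum = 1 then
        s ++ " " ++ replaceOp ++ " " ++ mutateLineAt rest 0 targetOp replaceOp
      else
        s ++ " " ++ targetOp ++ " " ++ mutateLineAt rest (instanceNum - 1) targetOp replaceOp

-- line.split(" " + op + " "): the separator is never empty, so Str.split? is always some
def mutateArith (line : String) (op : String) : List String :=
  let splits := (PySem.Str.split? line (" " ++ op ++ " ")).getD []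
  let instances : Int := (splits.length : Int) - 1
  (PySem.List.pyRange 0 (PySem.List.len arithCharsA) 1).foldl (fun out x =>
    if PySem.List.pyGetD arithCharsA x "" ≠ op then
      (PySem.List.pyRange 1 (instances + 1) 1).foldl (fun out y =>
        out ++ [mutateLineAt splits y op (PySem.List.pyGetD arithCharsA x "")]) out
    else out) []

-- ===== PORT B =====
def arithCharsB : List String := ["+", "-", "*", "/", "%"]

def mutateArith_alt (line : String) (op : String) : List String :=
  let sep := " " ++ op ++ " "
  let splits := (PySem.Str.split? line sep).getD []   -- sep never empty, so always some
  let n : Int := (splits.length : Int) - 1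
  arithCharsB.foldl (fun out c =>
    if c ≠ op then
      (PySem.List.pyRange 1 (n + 1) 1).foldl (fun out y =>
        -- seps = [sep]*n; seps[y-1] = " " + c + " "   (n ≥ 0 always; 1 ≤ y, so (y-1).toNat is exact)
        let seps := (List.replicate n.toNat sep).set (y - 1).toNat (" " ++ c ++ " ")
        -- res = splits[0]; for s, p in zip(seps, splits[1:]): res = res + s + p
        -- (splits[0] only evaluated with n ≥ 1, so index 0 is in range)
        let res := (seps.zip (PySem.List.slice splits (some 1) none)).foldl
          (fun r sp => r ++ sp.1 ++ sp.2) (PySem.List.pyGetD splits 0 "")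
        out ++ [res]) out
    else out) []

-- ===== PRECONDITION & SPEC =====
def Spec_mutateArith (line : String) (op : String) (out : List String) : Prop := out = mutateArith_alt line op
instance (line : String) (op : String) (out : List String) : Decidable (Spec_mutateArith line op out) := by unfold Spec_mutateArith; infer_instance

-- ===== CLAIM (what is proved, stated in full; the proofs are below) =====
def Claim_equal_mutateArith : Prop := ∀ (line : String) (op : String), Dom_mutateArith line op → Spec_mutateArith line op (mutateArith line op)

-- ===== LEMMAS AND PROOFS =====

-- right-assoc concatenation of (separator, piece) pairs
def pvJ : List (String × String) → String
  | [] => ""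
  | sp :: l => sp.1 ++ (sp.2 ++ pvJ l)

theorem pvFoldl_glue_eq (l : List (String × String)) : ∀ (s0 : String),
    l.foldl (fun r sp => r ++ sp.1 ++ sp.2) s0 = s0 ++ pvJ l := by
  induction l with
  | nil => intro s0; simp [pvJ]
  | cons sp l ih =>
      intro s0
      rw [List.foldl_cons, ih, pvJ]
      simp [String.append_assoc]

theorem pvMutateZero (t r : String) : ∀ (rest : List String) (s0 : String),
    mutateLineAt (s0 :: rest) 0 t r
      = s0 ++ pvJ ((List.replicate rest.length (" " ++ t ++ " ")).zip rest) := by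
  intro rest
  induction rest with
  | nil => intro s0; simp [mutateLineAt, pvJ]
  | cons p rest ih =>
      intro s0
      simp [mutateLineAt, ih, List.replicate_succ, pvJ, String.append_assoc]

theorem pvMutateKey (t r : String) : ∀ (rest : List String) (k : Nat) (s0 : String),
    k < rest.length →
    mutateLineAt (s0 :: rest) ((k : Int) + 1) t r
      = s0 ++ pvJ (((List.replicate rest.length (" " ++ t ++ " ")).set k (" " ++ r ++ " ")).zip rest) := by
  intro rest
  induction rest with
  | nil => intro k s0 h; simp at h
  | cons p rest ih =>
      intro k s0 _
      cases k with
      | zero =>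
          have h0 : ((0 : Nat) : Int) + 1 ≠ 0 := by norm_num
          simp [mutateLineAt, pvMutateZero, List.replicate_succ, pvJ, String.append_assoc]
      | succ k' =>
          have h0 : ((k' + 1 : Nat) : Int) + 1 ≠ 0 := by push_cast; omega
          have h1 : ((k' + 1 : Nat) : Int) + 1 ≠ 1 := by push_cast; omega
          have h2 : ((k' + 1 : Nat) : Int) + 1 - 1 = (k' : Int) + 1 := by push_cast; ring
          have hk' : k' < rest.length := by
            have := ‹k' + 1 < (p :: rest).length›
            simpa using this
          simp [mutateLineAt, ih k' p hk', List.replicate_succ, pvJ, String.append_assoc]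
          split_ifs with hA hB
          · exfalso; omega
          · exfalso; omega
          · rfl

theorem pvMain (line op : String) : mutateArith line op = mutateArith_alt line op := by
  simp only [mutateArith, mutateArith_alt]
  generalize (PySem.Str.split? line (" " ++ op ++ " ")).getD [] = S
  rw [PySem.List.foldl_pyRange_pyGetD arithCharsA ""
    (fun out c =>
      if c ≠ op then
        (PySem.List.pyRange 1 (((S.length : Int) - 1) + 1) 1).foldl (fun out y =>
          out ++ [mutateLineAt S y op c]) out
      else out) [] (le_refl 0)]
  simp only [Int.toNat_zero, List.drop_zero]
  have hAB : arithCharsA = arithCharsB := rfl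
  rw [hAB]
  apply PySem.List.foldl_congr_mem'
  intro c _ out
  by_cases hc : c ≠ op
  · simp only [if_pos hc]
    rw [PySem.List.foldl_append_singleton_eq_map, PySem.List.foldl_append_singleton_eq_map]
    congr 1
    apply List.map_congr_left
    intro y hy
    have hy' : 1 ≤ y ∧ y < ((S.length : Int) - 1) + 1 := by
      simpa [PySem.List.mem_pyRange_one] using hy
    -- S must have at least two elements
    cases S with
    | nil => exfalso; simp only [List.length_nil, Nat.cast_zero] at hy'; omega
    | cons s0 rest =>
        have hn : ((s0 :: rest).length : Int) - 1 = (rest.length : Int) := by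
          simp
        have hylt : y - 1 < (rest.length : Int) := by omega
        have hy1 : 1 ≤ y := hy'.1
        -- express y as k+1 with k : Nat
        have hk : ((y - 1).toNat : Int) = y - 1 := Int.toNat_of_nonneg (by omega)
        have hkk : (y - 1).toNat < rest.length := by omega
        have hyk : y = ((y - 1).toNat : Int) + 1 := by omega
        rw [hyk, pvMutateKey op c rest (y - 1).toNat s0 hkk]
        have hslice : PySem.List.slice (s0 :: rest) (some 1) none = rest := by
          rw [PySem.List.slice_from (s0 :: rest) (by norm_num : (0:Int) ≤ 1)]
          simp
        have hrep : (((s0 :: rest).length : Int) - 1).toNat = rest.length := by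
          simp
        rw [hslice, hrep]
        have hidx : (((y - 1).toNat : Int) + 1 - 1).toNat = (y - 1).toNat := by omega
        rw [hidx]
        rw [pvFoldl_glue_eq]
        simp [PySem.List.pyGetD]
  · simp [hc]

-- ===== VERDICT (by name: the statement is the Claim_ definition above) =====
theorem mutateArith_spec : Claim_equal_mutateArith := by
  intro line op _
  unfold Spec_mutateArith
  exact pvMain line op
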